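-- pv_equiv track=rewrite | github.com/yaejinpark/python-lc | codewars/python_mhardy/who_likes_it_mhardy.py | likes
-- ===== SOURCE A (Python) =====
-- def likes(names):
--     if not names:
--         return "no one likes this"
--     result = ""
--     i = 0
--     if len(names) >= 4:
--         for i in range(0, 1):
--             result = "{}, {} and {} others like this".format(names[0], names[1], len(names)-2)
--     elif len(names) == 1:
--         result += "{} likes this".format(names[i])
--     else:
--         while i < len(names)-2:
--             result += f"{names[i]}, "
--             i += 1
--         if i == len(names)-2:
--             result += "{} and {} like this".format(names[i], names[i+1])
--
--     return result
-- ===== SOURCE B (Python) =====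
-- # Table-dispatch reimplementation: templates indexed by count replace A's
-- # branch chain and while-loop accumulator.
-- _TEMPLATES = [
--     None,
--     "{} likes this",
--     "{} and {} like this",
--     "{}, {} and {} like this",
-- ]
--
-- def likes(names):
--     if not names:
--         return "no one likes this"
--     n = len(names)
--     if n <= 3:
--         return _TEMPLATES[n].format(*names)
--     return "{}, {} and {} others like this".format(names[0], names[1], n - 2)
-- ===== Notes on version B (the rewrite author's own statement) =====
-- stated objective: idiomatic
-- what changed: Replaced A's branch chain with a while-loop string accumulator by a count-indexed template table: guard for the empty list, then dispatch on len(names) to a format template (n<=3) or the 'others' format (n>=4); no loop and no mutable accumulator remain.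
import Mathlib
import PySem

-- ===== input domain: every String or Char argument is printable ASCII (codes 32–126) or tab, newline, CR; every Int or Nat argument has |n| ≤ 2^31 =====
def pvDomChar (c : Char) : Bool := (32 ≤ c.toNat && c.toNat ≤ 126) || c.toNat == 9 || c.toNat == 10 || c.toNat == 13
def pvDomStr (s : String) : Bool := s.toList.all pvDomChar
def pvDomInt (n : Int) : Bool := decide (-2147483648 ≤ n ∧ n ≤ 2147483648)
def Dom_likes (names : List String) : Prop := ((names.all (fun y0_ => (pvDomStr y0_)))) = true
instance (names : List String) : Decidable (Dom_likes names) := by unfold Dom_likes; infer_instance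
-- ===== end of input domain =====

-- B replaces A's branch chain + while-loop accumulator with a count-indexed template dispatch (idiomatic; same cost).

-- ===== PORT A =====
-- the 'while i < len(names)-2' loop: returns the final (i, result).
-- names[i] is always in range here (i < len-2 < len), so .getD "" never fires.
def likesLoop (names : List String) (i : Nat) (result : String) : Nat × String :=
  if i < names.length - 2 then
    likesLoop names (i + 1) (result ++ ((PySem.List.pyGet? names (i : Int)).getD "") ++ ", ")
  else (i, result)
termination_by names.length - 2 - i

def likes (names : List String) : String :=
  if names = [] then "no one likes this"
  else
    -- result = ""; i = 0
    if 4 ≤ names.length then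
      -- for i in range(0,1): one iteration, result assigned once
      ((PySem.List.pyGet? names (0 : Int)).getD "") ++ ", " ++
        ((PySem.List.pyGet? names (1 : Int)).getD "") ++ " and " ++
        PySem.Int.toStr ((names.length : Int) - 2) ++ " others like this"
    else if names.length = 1 then
      "" ++ ((PySem.List.pyGet? names (0 : Int)).getD "") ++ " likes this"
    else
      let p := likesLoop names 0 ""
      if p.1 = names.length - 2 then
        p.2 ++ ((PySem.List.pyGet? names (p.1 : Int)).getD "") ++ " and " ++
          ((PySem.List.pyGet? names ((p.1 : Int) + 1)).getD "") ++ " like this"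
      else p.2

-- ===== PORT B =====
-- _TEMPLATES[n].format(*names) for n ≤ 3: Lean has no varargs format, so the
-- table dispatch on the count is transcribed as a match on the list shape.
def likes_alt (names : List String) : String :=
  if names = [] then "no one likes this"
  else if names.length ≤ 3 then
    match names with
    | [a] => a ++ " likes this"
    | [a, b] => a ++ " and " ++ b ++ " like this"
    | [a, b, c] => a ++ ", " ++ b ++ " and " ++ c ++ " like this"
    | _ => ""  -- unreachable: names nonempty with length ≤ 3
  else
    ((PySem.List.pyGet? names (0 : Int)).getD "") ++ ", " ++
      ((PySem.List.pyGet? names (1 : Int)).getD "") ++ " and " ++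
      PySem.Int.toStr ((names.length : Int) - 2) ++ " others like this"

-- ===== PRECONDITION & SPEC =====
def Spec_likes (names : List String) (out : String) : Prop := out = likes_alt names
instance (names : List String) (out : String) : Decidable (Spec_likes names out) := by unfold Spec_likes; infer_instance

-- ===== CLAIM (what is proved, stated in full; the proofs are below) =====
def Claim_equal_likes : Prop := ∀ (names : List String), Dom_likes names → Spec_likes names (likes names)

-- ===== LEMMAS AND PROOFS =====

-- ===== VERDICT (by name: the statement is the Claim_ definition above) =====
theorem likes_spec : Claim_equal_likes := by
  intro names _
  unfold Spec_likes
  match names with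
  | [] => rfl
  | [a] => simp [likes, likes_alt]
  | [a, b] =>
      simp [likes, likes_alt, likesLoop]
  | [a, b, c] =>
      simp [likes, likes_alt, likesLoop, PySem.List.pyGet?, PySem.List.pyIdx?]
  | a :: b :: c :: d :: t =>
      simp [likes, likes_alt]
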